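-- pv_equiv track=rewrite | github.com/mediwind/PS_Algorithm | 백준/Gold/11761. Shuffling Along/Shuffling Along.py | build_permutation
-- ===== SOURCE A (Python) =====
-- def build_permutation(n, mode):
--     """
--     한 번의 퍼펙트 셔플(모드: "in" 또는 "out")이 만들어내는
--     old_index -> new_index 순열을 반환.
--     """
--     # 인덱스 리스트로 반으로 나눔
--     if mode == "out":
--         # out: 앞쪽(첫 절반)이 같거나 1 더 많음(홀수일 때)
--         k = (n + 1) // 2  # 앞쪽 길이
--         first = list(range(0, k))
--         second = list(range(k, n))
--         # interleave starting with first
--         new_order = []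
--         i = j = 0
--         while i < len(first) or j < len(second):
--             if i < len(first):
--                 new_order.append(first[i]); i += 1
--             if j < len(second):
--                 new_order.append(second[j]); j += 1
--     else:
--         # in: 뒤쪽(두번째 절반)이 같거나 1 더 많음(홀수일 때)
--         k = n // 2  # 앞쪽 길이 (작음 when odd)
--         first = list(range(0, k))
--         second = list(range(k, n))
--         # interleave starting with second
--         new_order = []
--         i = j = 0
--         while i < len(first) or j < len(second):
--             if j < len(second):
--                 new_order.append(second[j]); j += 1
--             if i < len(first):
--                 new_order.append(first[i]); i += 1
--
--     # old_index -> new_index 매핑 생성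
--     perm = [0] * n
--     for new_idx, old_idx in enumerate(new_order):
--         perm[old_idx] = new_idx
--     return perm
-- ===== SOURCE B (Python) =====
-- def build_permutation(n, mode):
--     if mode == "out":
--         k = (n + 1) // 2
--         return [2 * i if i < k else 2 * (i - k) + 1 for i in range(n)]
--     k = n // 2
--     return [2 * i + 1 if i < k else 2 * (i - k) for i in range(n)]
-- ===== Notes on version B (the rewrite author's own statement) =====
-- stated objective: simpler
-- what changed: Replaced the split-interleave-invert pipeline (build two half ranges, merge them with a two-pointer while loop, then invert via a placement pass) by one list comprehension that computes each old index's new position with a closed-form formula.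
import Mathlib
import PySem

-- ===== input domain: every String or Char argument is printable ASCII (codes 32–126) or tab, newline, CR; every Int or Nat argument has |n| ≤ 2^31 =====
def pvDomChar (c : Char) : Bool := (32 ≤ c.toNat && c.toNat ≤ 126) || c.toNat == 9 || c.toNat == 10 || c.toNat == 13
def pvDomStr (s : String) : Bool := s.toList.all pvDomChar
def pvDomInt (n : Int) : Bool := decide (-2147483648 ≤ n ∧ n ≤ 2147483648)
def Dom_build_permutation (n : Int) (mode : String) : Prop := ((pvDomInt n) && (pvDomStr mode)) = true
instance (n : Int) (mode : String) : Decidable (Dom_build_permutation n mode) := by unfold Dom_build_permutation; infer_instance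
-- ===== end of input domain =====

-- B replaces A's split/interleave/invert pipeline by one closed-form comprehension (objective: simpler).

-- ===== PORT A =====
-- the "out" while loop: append first[i] (if any), then second[j] (if any), until both exhausted
def loopOut (f s : List Int) (i j : Nat) (acc : List Int) : List Int :=
  if hi : i < f.length then
    if h : j < s.length then loopOut f s (i + 1) (j + 1) (acc ++ [f[i]] ++ [s[j]])
    else loopOut f s (i + 1) j (acc ++ [f[i]])
  else
    if h : j < s.length then loopOut f s i (j + 1) (acc ++ [s[j]])
    else acc
termination_by (f.length - i) + (s.length - j)
decreasing_by all_goals omega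

-- the "in" while loop: append second[j] (if any), then first[i] (if any)
def loopIn (f s : List Int) (i j : Nat) (acc : List Int) : List Int :=
  if hj : j < s.length then
    if h : i < f.length then loopIn f s (i + 1) (j + 1) (acc ++ [s[j]] ++ [f[i]])
    else loopIn f s i (j + 1) (acc ++ [s[j]])
  else
    if h : i < f.length then loopIn f s (i + 1) j (acc ++ [f[i]])
    else acc
termination_by (f.length - i) + (s.length - j)
decreasing_by all_goals omega

def build_permutation (n : Int) (mode : String) : List Int :=
  let new_order :=
    if mode = "out" then
      let k := PySem.Int.floordiv (n + 1) 2
      let first := PySem.List.pyRange 0 k 1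
      let second := PySem.List.pyRange k n 1
      loopOut first second 0 0 []
    else
      let k := PySem.Int.floordiv n 2
      let first := PySem.List.pyRange 0 k 1
      let second := PySem.List.pyRange k n 1
      loopIn first second 0 0 []
  let perm := List.replicate n.toNat (0 : Int)
  (PySem.List.enumerate new_order 0).foldl
    (fun perm p => PySem.List.pySetD perm p.2 p.1) perm

-- ===== PORT B =====
def build_permutation_alt (n : Int) (mode : String) : List Int :=
  if mode = "out" then
    let k := PySem.Int.floordiv (n + 1) 2
    (PySem.List.pyRange 0 n 1).map (fun i => if i < k then 2 * i else 2 * (i - k) + 1)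
  else
    let k := PySem.Int.floordiv n 2
    (PySem.List.pyRange 0 n 1).map (fun i => if i < k then 2 * i + 1 else 2 * (i - k))

-- ===== PRECONDITION & SPEC =====
def Spec_build_permutation (n : Int) (mode : String) (out : List Int) : Prop := out = build_permutation_alt n mode
instance (n : Int) (mode : String) (out : List Int) : Decidable (Spec_build_permutation n mode out) := by unfold Spec_build_permutation; infer_instance

-- ===== CLAIM (what is proved, stated in full; the proofs are below) =====
def Claim_equal_build_permutation : Prop := ∀ (n : Int) (mode : String), Dom_build_permutation n mode → Spec_build_permutation n mode (build_permutation n mode)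

-- ===== LEMMAS AND PROOFS =====

def interA : List Int → List Int → List Int
  | [], ys => ys
  | x :: xs, [] => x :: xs
  | x :: xs, y :: ys => x :: y :: interA xs ys

theorem loopOut_eq_interA (f s : List Int) (i j : Nat) (acc : List Int) :
    loopOut f s i j acc = acc ++ interA (f.drop i) (s.drop j) := by
  fun_induction loopOut f s i j acc with
  | case1 i j acc hi hj ih =>
      rw [ih, List.drop_eq_getElem_cons hi, List.drop_eq_getElem_cons hj]
      simp [interA]
  | case2 i j acc hi hj ih =>
      rw [ih, List.drop_eq_getElem_cons hi, List.drop_eq_nil_of_le (by omega : s.length ≤ j)]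
      cases f.drop (i+1) <;> simp [interA]
  | case3 i j acc hi hj ih =>
      rw [ih, List.drop_eq_getElem_cons hj, List.drop_eq_nil_of_le (by omega : f.length ≤ i)]
      simp [interA]
  | case4 i j acc hi hj =>
      rw [List.drop_eq_nil_of_le (by omega : f.length ≤ i), List.drop_eq_nil_of_le (by omega : s.length ≤ j)]
      simp [interA]
def interB : List Int → List Int → List Int
  | xs, [] => xs
  | [], y :: ys => y :: ys
  | x :: xs, y :: ys => y :: x :: interB xs ys

theorem loopIn_eq_interB (f s : List Int) (i j : Nat) (acc : List Int) :
    loopIn f s i j acc = acc ++ interB (f.drop i) (s.drop j) := by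
  fun_induction loopIn f s i j acc with
  | case1 i j acc hj hi ih =>
      rw [ih, List.drop_eq_getElem_cons hi, List.drop_eq_getElem_cons hj]
      simp [interB]
  | case2 i j acc hj hi ih =>
      rw [ih, List.drop_eq_getElem_cons hj, List.drop_eq_nil_of_le (by omega : f.length ≤ i)]
      cases s.drop (j+1) <;> simp [interB]
  | case3 i j acc hj hi ih =>
      rw [ih, List.drop_eq_getElem_cons hi, List.drop_eq_nil_of_le (by omega : s.length ≤ j)]
      cases f.drop (i+1) <;> simp [interB]
  | case4 i j acc hj hi =>
      rw [List.drop_eq_nil_of_le (by omega : f.length ≤ i), List.drop_eq_nil_of_le (by omega : s.length ≤ j)]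
      simp [interB]

theorem interA_perm (f s : List Int) : (interA f s).Perm (f ++ s) := by
  fun_induction interA f s with
  | case1 ys => simp
  | case2 x xs => simp
  | case3 x xs y ys ih =>
      simp only [List.cons_append]
      exact .cons x ((ih.cons y).trans (List.perm_middle.symm))

theorem interB_perm (f s : List Int) : (interB f s).Perm (f ++ s) := by
  fun_induction interB f s with
  | case1 xs => simp
  | case2 y ys => simp
  | case3 x xs y ys ih =>
      simp only [List.cons_append]
      exact ((ih.cons x).cons y).trans ((List.Perm.swap x y _).trans (List.perm_middle.symm.cons x))

theorem interA_get_even (f s : List Int) (h : f.length ≤ s.length + 1)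
    (i : Nat) (hi : i < f.length) : (interA f s)[2 * i]? = f[i]? := by
  fun_induction interA f s generalizing i with
  | case1 ys => simp at hi
  | case2 x xs =>
      simp only [List.length_cons] at hi
      have hxs : xs.length = 0 := by simpa using h
      have hi0 : i = 0 := by omega
      subst hi0; simp
  | case3 x xs y ys ih =>
      match i with
      | 0 => simp
      | i + 1 =>
          have : 2 * (i + 1) = (2 * i) + 1 + 1 := by ring
          rw [this]
          simp only [List.getElem?_cons_succ]
          exact ih (by simpa using h) i (by simpa using hi)

theorem interA_get_odd (f s : List Int) (h : s.length ≤ f.length)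
    (j : Nat) (hj : j < s.length) : (interA f s)[2 * j + 1]? = s[j]? := by
  fun_induction interA f s generalizing j with
  | case1 ys => simp at h; simp [h] at hj
  | case2 x xs => simp at hj
  | case3 x xs y ys ih =>
      match j with
      | 0 => simp
      | j + 1 =>
          have : 2 * (j + 1) + 1 = (2 * j + 1) + 1 + 1 := by ring
          rw [this]
          simp only [List.getElem?_cons_succ]
          exact ih (by simpa using h) j (by simpa using hj)

theorem interB_get_even (f s : List Int) (h : s.length ≤ f.length + 1)
    (j : Nat) (hj : j < s.length) : (interB f s)[2 * j]? = s[j]? := by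
  fun_induction interB f s generalizing j with
  | case1 xs => simp at hj
  | case2 y ys =>
      simp only [List.length_cons] at hj
      have hys : ys.length = 0 := by simpa using h
      have hj0 : j = 0 := by omega
      subst hj0; simp
  | case3 x xs y ys ih =>
      match j with
      | 0 => simp
      | j + 1 =>
          have : 2 * (j + 1) = (2 * j) + 1 + 1 := by ring
          rw [this]
          simp only [List.getElem?_cons_succ]
          exact ih (by simpa using h) j (by simpa using hj)

theorem interB_get_odd (f s : List Int) (h : f.length ≤ s.length)
    (i : Nat) (hi : i < f.length) : (interB f s)[2 * i + 1]? = f[i]? := by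
  fun_induction interB f s generalizing i with
  | case1 xs => simp at h; simp [h] at hi
  | case2 y ys => simp at hi
  | case3 x xs y ys ih =>
      match i with
      | 0 => simp
      | i + 1 =>
          have : 2 * (i + 1) + 1 = (2 * i + 1) + 1 + 1 := by ring
          rw [this]
          simp only [List.getElem?_cons_succ]
          exact ih (by simpa using h) i (by simpa using hi)
theorem foldl_pySetD_length (pairs : List (Int × Int)) (base : List Int) :
    (pairs.foldl (fun perm p => PySem.List.pySetD perm p.2 p.1) base).length = base.length := by
  induction pairs generalizing base with
  | nil => rfl
  | cons p rest ih => simp [ih, PySem.List.length_pySetD]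

theorem foldl_pySetD_not_mem (pairs : List (Int × Int)) (base : List Int) (u : Nat)
    (hnm : (u : Int) ∉ pairs.map (·.2)) (hnn : ∀ q ∈ pairs, 0 ≤ q.2) :
    (pairs.foldl (fun perm p => PySem.List.pySetD perm p.2 p.1) base)[u]? = base[u]? := by
  induction pairs generalizing base with
  | nil => rfl
  | cons p rest ih =>
      simp only [List.map_cons, List.mem_cons, not_or] at hnm
      have h2 : 0 ≤ p.2 := hnn p (by simp)
      rw [List.foldl_cons, ih _ hnm.2 (fun q hq => hnn q (List.mem_cons_of_mem _ hq))]
      rw [PySem.List.pySetD_of_nonneg _ _ h2]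
      rw [List.getElem?_set_ne (by have := hnm.1; omega)]

theorem foldl_pySetD_mem (pairs : List (Int × Int)) (base : List Int) (u : Nat) (v : Int)
    (hmem : (v, (u : Int)) ∈ pairs) (hnd : (pairs.map (·.2)).Nodup)
    (hnn : ∀ q ∈ pairs, 0 ≤ q.2) (hu : u < base.length) :
    (pairs.foldl (fun perm p => PySem.List.pySetD perm p.2 p.1) base)[u]? = some v := by
  induction pairs generalizing base with
  | nil => simp at hmem
  | cons p rest ih =>
      simp only [List.map_cons, List.nodup_cons] at hnd
      rcases List.mem_cons.mp hmem with hhd | htl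
      · subst hhd
        rw [List.foldl_cons]
        rw [foldl_pySetD_not_mem rest _ u (by simpa using hnd.1) (fun q hq => hnn q (List.mem_cons_of_mem _ hq))]
        rw [PySem.List.pySetD_natCast]; exact List.getElem?_set_self hu
      · rw [List.foldl_cons]
        exact ih _ htl hnd.2 (fun q hq => hnn q (List.mem_cons_of_mem _ hq))
          (by rwa [PySem.List.length_pySetD])
theorem fold_enumerate_eq_map (NO : List Int) (g : Int → Int)
    (hnd : NO.Nodup) (hpos : ∀ x ∈ NO, 0 ≤ x)
    (hg : ∀ u : Nat, u < NO.length →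
      ∃ p : Nat, p < NO.length ∧ (p : Int) = g u ∧ NO[p]? = some (u : Int)) :
    (PySem.List.enumerate NO 0).foldl (fun perm q => PySem.List.pySetD perm q.2 q.1)
      (List.replicate NO.length (0 : Int))
    = (PySem.List.pyRange 0 (NO.length : Int) 1).map g := by
  apply List.ext_getElem?
  intro u
  by_cases hu : u < NO.length
  · obtain ⟨p, hp, hpg, hNO⟩ := hg u hu
    have hmem : ((p : Int), (u : Int)) ∈ PySem.List.enumerate NO 0 := by
      rw [PySem.List.enumerate_eq_map_pyRange NO 0]
      refine List.mem_map.mpr ⟨(p : Int), ?_, ?_⟩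
      · exact PySem.List.mem_pyRange_one.mpr (by simp [PySem.List.len_eq]; omega)
      · rw [PySem.List.pyGetD_natCast]
        simp [List.getD, hNO]
    rw [foldl_pySetD_mem _ _ u (p : Int) hmem
      (by rw [PySem.List.map_snd_enumerate]; exact hnd)
      (fun q hq => by
        have : q.2 ∈ NO := by
          rw [← PySem.List.map_snd_enumerate NO 0]
          exact List.mem_map.mpr ⟨q, hq, rfl⟩
        exact hpos _ this)
      (by simpa using hu)]
    rw [List.getElem?_map, PySem.List.getElem?_pyRange_one]
    rw [if_pos (by omega)]
    simp [hpg]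
  · rw [List.getElem?_eq_none (by simpa [foldl_pySetD_length] using not_lt.mp hu),
        List.getElem?_eq_none (by simp [PySem.List.length_pyRange_one]; omega)]
theorem out_case (n : Int) :
    (PySem.List.enumerate (loopOut (PySem.List.pyRange 0 (PySem.Int.floordiv (n + 1) 2) 1)
        (PySem.List.pyRange (PySem.Int.floordiv (n + 1) 2) n 1) 0 0 []) 0).foldl
      (fun perm p => PySem.List.pySetD perm p.2 p.1) (List.replicate n.toNat (0 : Int))
    = (PySem.List.pyRange 0 n 1).map
        (fun i => if i < PySem.Int.floordiv (n + 1) 2 then 2 * i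
                  else 2 * (i - PySem.Int.floordiv (n + 1) 2) + 1) := by
  set k := PySem.Int.floordiv (n + 1) 2 with hkdef
  have hk : k * 2 ≤ n + 1 ∧ n + 1 < (k + 1) * 2 :=
    (PySem.Int.floordiv_eq_iff_of_pos (by omega)).mp hkdef.symm
  rw [loopOut_eq_interA]
  simp only [List.drop_zero, List.nil_append]
  by_cases hn : 0 < n
  · have h0k : 0 ≤ k := by omega
    have hkn : k ≤ n := by omega
    have hFS : PySem.List.pyRange 0 k 1 ++ PySem.List.pyRange k n 1 = PySem.List.pyRange 0 n 1 :=
      (PySem.List.pyRange_one_append 0 k n h0k hkn).symm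
    set NO := interA (PySem.List.pyRange 0 k 1) (PySem.List.pyRange k n 1) with hNOdef
    have hperm : NO.Perm (PySem.List.pyRange 0 n 1) := (interA_perm _ _).trans (by rw [hFS])
    have hlen : NO.length = n.toNat := by
      rw [hperm.length_eq, PySem.List.length_pyRange_one]; omega
    have hc : (NO.length : Int) = n := by
      rw [hlen]; omega
    rw [show n.toNat = NO.length from hlen.symm, ← hc]
    refine fold_enumerate_eq_map _ _ (hperm.nodup_iff.mpr (PySem.List.nodup_pyRange_one _ _))
      (fun x hx => (PySem.List.mem_pyRange_one.mp (hperm.subset hx)).1) ?_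
    intro u hu
    rw [hlen] at hu
    have hFlen : (PySem.List.pyRange 0 k 1).length = k.toNat := by
      rw [PySem.List.length_pyRange_one]; omega
    have hSlen : (PySem.List.pyRange k n 1).length = (n - k).toNat := by
      rw [PySem.List.length_pyRange_one]
    by_cases hv : (u : Int) < k
    · refine ⟨2 * u, by omega, ?_, ?_⟩
      · rw [if_pos hv]; push_cast; ring
      · rw [hNOdef, interA_get_even _ _ (by omega) u (by omega)]
        rw [PySem.List.getElem?_pyRange_one, if_pos (by omega)]
        simp
    · refine ⟨2 * (u - k.toNat) + 1, by omega, ?_, ?_⟩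
      · rw [if_neg hv]; push_cast [show k.toNat ≤ u by omega]; omega
      · rw [hNOdef, interA_get_odd _ _ (by omega) (u - k.toNat) (by omega)]
        rw [PySem.List.getElem?_pyRange_one, if_pos (by omega)]
        congr 1; push_cast [show k.toNat ≤ u by omega]; omega
  · have hkn : n ≤ k := by omega
    have hk0 : k ≤ 0 := by omega
    rw [PySem.List.pyRange_one_eq_nil hk0, PySem.List.pyRange_one_eq_nil hkn,
        PySem.List.pyRange_one_eq_nil (by omega : n ≤ 0)]
    simp [interA, Int.toNat_of_nonpos (by omega : n ≤ 0)]

theorem in_case (n : Int) :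
    (PySem.List.enumerate (loopIn (PySem.List.pyRange 0 (PySem.Int.floordiv n 2) 1)
        (PySem.List.pyRange (PySem.Int.floordiv n 2) n 1) 0 0 []) 0).foldl
      (fun perm p => PySem.List.pySetD perm p.2 p.1) (List.replicate n.toNat (0 : Int))
    = (PySem.List.pyRange 0 n 1).map
        (fun i => if i < PySem.Int.floordiv n 2 then 2 * i + 1
                  else 2 * (i - PySem.Int.floordiv n 2)) := by
  set k := PySem.Int.floordiv n 2 with hkdef
  have hk : k * 2 ≤ n ∧ n < (k + 1) * 2 :=
    (PySem.Int.floordiv_eq_iff_of_pos (by omega)).mp hkdef.symm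
  rw [loopIn_eq_interB]
  simp only [List.drop_zero, List.nil_append]
  by_cases hn : 0 < n
  · have h0k : 0 ≤ k := by omega
    have hkn : k ≤ n := by omega
    have hFS : PySem.List.pyRange 0 k 1 ++ PySem.List.pyRange k n 1 = PySem.List.pyRange 0 n 1 :=
      (PySem.List.pyRange_one_append 0 k n h0k hkn).symm
    set NO := interB (PySem.List.pyRange 0 k 1) (PySem.List.pyRange k n 1) with hNOdef
    have hperm : NO.Perm (PySem.List.pyRange 0 n 1) := (interB_perm _ _).trans (by rw [hFS])
    have hlen : NO.length = n.toNat := by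
      rw [hperm.length_eq, PySem.List.length_pyRange_one]; omega
    have hc : (NO.length : Int) = n := by
      rw [hlen]; omega
    rw [show n.toNat = NO.length from hlen.symm, ← hc]
    refine fold_enumerate_eq_map _ _ (hperm.nodup_iff.mpr (PySem.List.nodup_pyRange_one _ _))
      (fun x hx => (PySem.List.mem_pyRange_one.mp (hperm.subset hx)).1) ?_
    intro u hu
    rw [hlen] at hu
    have hFlen : (PySem.List.pyRange 0 k 1).length = k.toNat := by
      rw [PySem.List.length_pyRange_one]; omega
    have hSlen : (PySem.List.pyRange k n 1).length = (n - k).toNat := by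
      rw [PySem.List.length_pyRange_one]
    by_cases hv : (u : Int) < k
    · refine ⟨2 * u + 1, by omega, ?_, ?_⟩
      · rw [if_pos hv]; push_cast; ring
      · rw [hNOdef, interB_get_odd _ _ (by omega) u (by omega)]
        rw [PySem.List.getElem?_pyRange_one, if_pos (by omega)]
        simp
    · refine ⟨2 * (u - k.toNat), by omega, ?_, ?_⟩
      · rw [if_neg hv]; push_cast [show k.toNat ≤ u by omega]; omega
      · rw [hNOdef, interB_get_even _ _ (by omega) (u - k.toNat) (by omega)]
        rw [PySem.List.getElem?_pyRange_one, if_pos (by omega)]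
        congr 1; push_cast [show k.toNat ≤ u by omega]; omega
  · have hkn : n ≤ k := by omega
    have hk0 : k ≤ 0 := by omega
    rw [PySem.List.pyRange_one_eq_nil hk0, PySem.List.pyRange_one_eq_nil hkn,
        PySem.List.pyRange_one_eq_nil (by omega : n ≤ 0)]
    simp [interB, Int.toNat_of_nonpos (by omega : n ≤ 0)]


-- ===== VERDICT (by name: the statement is the Claim_ definition above) =====
theorem build_permutation_spec : Claim_equal_build_permutation := by
  intro n mode _
  show build_permutation n mode = build_permutation_alt n mode
  unfold build_permutation build_permutation_alt
  by_cases hm : mode = "out"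
  · simp only [hm, if_pos]
    exact out_case n
  · simp only [if_neg hm]
    exact in_case n
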